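-- pv_equiv track=rewrite | github.com/mk0653/untitled | kyopro/ABC160_B.py | check
-- ===== SOURCE A (Python) =====
-- def check(x,buf):
--     if x >= 500:
--         m = x%500
--         buf += (x//500)*1000
--         buf = check(m,buf)
--         return buf
--     elif 0 < x >= 5:
--         buf += (x//5)*5
--         return buf
--     else:
--         return buf
-- ===== SOURCE B (Python) =====
-- def check(x, buf):
--     # Closed form: 500-blocks give 1000 each, remaining 5-blocks give 5 each.
--     if x >= 5:
--         return buf + (x // 500) * 1000 + ((x % 500) // 5) * 5
--     return buf
-- ===== Notes on version B (the rewrite author's own statement) =====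
-- stated objective: simpler
-- what changed: Replaced the recursion with a single closed-form arithmetic expression: for x >= 5 return buf + (x//500)*1000 + ((x%500)//5)*5, otherwise buf.
import Mathlib
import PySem

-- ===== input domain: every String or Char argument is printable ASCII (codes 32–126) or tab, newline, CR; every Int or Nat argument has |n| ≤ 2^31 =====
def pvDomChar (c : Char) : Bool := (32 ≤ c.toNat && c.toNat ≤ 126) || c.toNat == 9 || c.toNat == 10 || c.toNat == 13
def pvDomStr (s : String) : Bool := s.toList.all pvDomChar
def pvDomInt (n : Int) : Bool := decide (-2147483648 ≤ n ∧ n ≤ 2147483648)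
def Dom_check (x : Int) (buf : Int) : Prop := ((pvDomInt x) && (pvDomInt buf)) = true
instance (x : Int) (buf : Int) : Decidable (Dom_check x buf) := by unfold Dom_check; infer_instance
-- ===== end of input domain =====

-- ===== PORT A =====
-- B replaces A's recursion with one closed-form arithmetic expression (simpler).
def check (x : Int) (buf : Int) : Int :=
  if 500 ≤ x then
    let m := PySem.Int.mod x 500
    let buf1 := buf + PySem.Int.floordiv x 500 * 1000
    check m buf1
  else if 0 < x ∧ 5 ≤ x then
    buf + PySem.Int.floordiv x 5 * 5
  else
    buf
termination_by x.toNat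
decreasing_by
  have h1 : 0 ≤ PySem.Int.mod x 500 ∧ PySem.Int.mod x 500 < 500 := by
    constructor
    · simpa using PySem.Int.mod_nonneg (a := x) (b := 500) (by norm_num)
    · simpa using PySem.Int.mod_lt (a := x) (b := 500) (by norm_num)
  omega

-- ===== PORT B =====
def check_alt (x : Int) (buf : Int) : Int :=
  if 5 ≤ x then
    buf + PySem.Int.floordiv x 500 * 1000 + PySem.Int.floordiv (PySem.Int.mod x 500) 5 * 5
  else
    buf

-- ===== PRECONDITION & SPEC =====
def Spec_check (x : Int) (buf : Int) (out : Int) : Prop := out = check_alt x buf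
instance (x : Int) (buf : Int) (out : Int) : Decidable (Spec_check x buf out) := by unfold Spec_check; infer_instance

-- ===== CLAIM (what is proved, stated in full; the proofs are below) =====
def Claim_equal_check : Prop := ∀ (x : Int) (buf : Int), Dom_check x buf → Spec_check x buf (check x buf)

-- ===== LEMMAS AND PROOFS =====

-- ===== VERDICT (by name: the statement is the Claim_ definition above) =====
theorem check_spec : Claim_equal_check := by
  intro x buf _
  unfold Spec_check check_alt
  by_cases h : 500 ≤ x
  · have hm0 : 0 ≤ PySem.Int.mod x 500 := by
      simpa using PySem.Int.mod_nonneg (a := x) (b := 500) (by norm_num)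
    have hm5 : PySem.Int.mod x 500 < 500 := by
      simpa using PySem.Int.mod_lt (a := x) (b := 500) (by norm_num)
    have hmm : PySem.Int.mod (PySem.Int.mod x 500) 500 = PySem.Int.mod x 500 := by
      rw [PySem.Int.mod_eq_emod_of_pos (by norm_num), PySem.Int.mod_eq_emod_of_pos (by norm_num)]
      omega
    rw [check, if_pos h, check, if_neg (by omega)]
    by_cases h5 : 5 ≤ PySem.Int.mod x 500
    · rw [if_pos ⟨by omega, h5⟩, if_pos (by omega)]
    · rw [if_neg (by omega), if_pos (by omega)]
      have : PySem.Int.floordiv (PySem.Int.mod x 500) 5 = 0 := by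
        rw [PySem.Int.floordiv_eq_iff_of_pos (by norm_num)]
        omega
      rw [this]; ring
  · rw [check, if_neg h]
    by_cases h5 : 5 ≤ x
    · rw [if_pos ⟨by omega, h5⟩, if_pos h5]
      have hd : PySem.Int.floordiv x 500 = 0 := by
        rw [PySem.Int.floordiv_eq_iff_of_pos (by norm_num)]; omega
      have hm : PySem.Int.mod x 500 = x := by
        rw [PySem.Int.mod_eq_emod_of_pos (by norm_num)]; omega
      rw [hd, hm]; ring
    · rw [if_neg (by omega), if_neg h5]
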